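-- pv_equiv track=rewrite | github.com/roxana-lafuente/TTT | evaluation.py | filterTER
-- ===== SOURCE A (Python) =====
-- def filterTER (lines):
--     result = ''
--     lines = lines.splitlines()
--     for line in lines:
--         if "Total TER:" in line:
--             result += line.replace("Total TER:","")
--         if "Warning, Invalid line:" in line:
--             result = " There are lines unchanged from source to reference. HTER cannot work in those cases."
--             break
--     return result + "\n"
-- ===== SOURCE B (Python) =====
-- def filterTER(lines):
--     ls = lines.splitlines()
--     if any("Warning, Invalid line:" in line for line in ls):
--         return " There are lines unchanged from source to reference. HTER cannot work in those cases.\n"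
--     return ''.join(line.replace("Total TER:", "") for line in ls if "Total TER:" in line) + "\n"
-- ===== Notes on version B (the rewrite author's own statement) =====
-- stated objective: simpler
-- what changed: Replaces the single interleaved accumulate-and-break loop by a detection pass (any) that returns the fixed warning message, and otherwise a filter/replace/join pass building the result.
import Mathlib
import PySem

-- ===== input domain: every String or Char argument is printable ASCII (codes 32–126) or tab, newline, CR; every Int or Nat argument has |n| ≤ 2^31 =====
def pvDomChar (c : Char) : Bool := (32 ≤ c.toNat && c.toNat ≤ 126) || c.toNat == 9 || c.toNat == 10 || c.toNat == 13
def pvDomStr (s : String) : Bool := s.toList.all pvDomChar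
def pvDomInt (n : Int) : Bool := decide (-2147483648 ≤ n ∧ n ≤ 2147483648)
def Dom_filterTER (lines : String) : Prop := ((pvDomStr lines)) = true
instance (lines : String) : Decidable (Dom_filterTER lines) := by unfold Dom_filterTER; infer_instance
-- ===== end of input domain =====

-- B replaces A's interleaved accumulate-and-break loop by a warning-detection pass and a
-- separate filter/replace/join pass (objective: simpler decomposition).

def pvWarnMsg : String := " There are lines unchanged from source to reference. HTER cannot work in those cases."

-- ===== PORT A =====
-- A's loop: accumulate replaced TER lines; a warning line overwrites the result and breaks.
def pvALoop : List String → List Char → List Char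
  | [], acc => acc
  | l :: ls, acc =>
    let acc' := if PySem.Str.isIn "Total TER:" l
                then acc ++ (PySem.Str.replace l "Total TER:" "").toList else acc
    if PySem.Str.isIn "Warning, Invalid line:" l then pvWarnMsg.toList
    else pvALoop ls acc'

def filterTER (lines : String) : String :=
  String.mk (pvALoop (PySem.Str.splitlines lines) [] ++ ['\n'])

-- ===== PORT B =====
def filterTER_alt (lines : String) : String :=
  let ls := PySem.Str.splitlines lines
  if ls.any (fun l => PySem.Str.isIn "Warning, Invalid line:" l) then
    String.mk (pvWarnMsg.toList ++ ['\n'])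
  else
    String.mk (PySem.Chars.join []
      ((ls.filter (fun l => PySem.Str.isIn "Total TER:" l)).map
        (fun l => (PySem.Str.replace l "Total TER:" "").toList)) ++ ['\n'])

-- ===== PRECONDITION & SPEC =====
def Spec_filterTER (lines : String) (out : String) : Prop := out = filterTER_alt lines
instance (lines : String) (out : String) : Decidable (Spec_filterTER lines out) := by unfold Spec_filterTER; infer_instance

-- ===== CLAIM (what is proved, stated in full; the proofs are below) =====
def Claim_equal_filterTER : Prop := ∀ (lines : String), Dom_filterTER lines → Spec_filterTER lines (filterTER lines)

-- ===== LEMMAS AND PROOFS =====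
theorem pvJoinNil (xs : List (List Char)) : PySem.Chars.join [] xs = xs.flatten := by
  induction xs with
  | nil => rfl
  | cons x xs ih =>
    cases xs with
    | nil => simp [PySem.Chars.join, List.intercalate]
    | cons y ys =>
      have h : List.intersperse ([] : List Char) (x :: y :: ys)
          = x :: [] :: List.intersperse [] (y :: ys) := rfl
      simp only [PySem.Chars.join, List.intercalate] at ih ⊢
      rw [h, List.flatten_cons, List.flatten_cons, ih, List.nil_append]
      simp

theorem pvALoop_eq (ls : List String) (acc : List Char) :
    pvALoop ls acc =
      if ls.any (fun l => PySem.Str.isIn "Warning, Invalid line:" l) then pvWarnMsg.toList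
      else acc ++ ((ls.filter (fun l => PySem.Str.isIn "Total TER:" l)).map
          (fun l => (PySem.Str.replace l "Total TER:" "").toList)).flatten := by
  induction ls generalizing acc with
  | nil =>
    simp only [pvALoop, List.any_nil, List.filter_nil, List.map_nil, List.flatten_nil,
      List.append_nil, Bool.false_eq_true, if_false]
  | cons l ls ih =>
    simp only [pvALoop, List.any_cons, List.filter_cons]
    by_cases hw : PySem.Str.isIn "Warning, Invalid line:" l = true
    · rw [if_pos hw, hw, Bool.true_or, if_pos rfl]
    · have hw' : PySem.Str.isIn "Warning, Invalid line:" l = false := Bool.eq_false_iff.mpr hw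
      rw [if_neg hw, ih, hw', Bool.false_or]
      by_cases ht : PySem.Str.isIn "Total TER:" l = true
      · rw [if_pos ht, if_pos ht, List.map_cons, List.flatten_cons]
        exact if_congr Iff.rfl rfl (by rw [List.append_assoc])
      · rw [if_neg ht, if_neg ht]

-- ===== VERDICT (by name: the statement is the Claim_ definition above) =====
theorem filterTER_spec : Claim_equal_filterTER := by
  intro lines _
  unfold Spec_filterTER filterTER filterTER_alt
  rw [pvALoop_eq]
  by_cases h : ((PySem.Str.splitlines lines).any fun l => PySem.Str.isIn "Warning, Invalid line:" l) = true
  · rw [if_pos h, if_pos h]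
  · rw [if_neg h, if_neg h, List.nil_append, pvJoinNil]
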